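-- pv_equiv track=rewrite | github.com/Benlog/ReseauxConceptuels | outils_stats.py | liste_tout_ngram
-- ===== SOURCE A (Python) =====
-- def liste_tout_ngram(liste):
--     """_summary_
--
--     Args:
--         liste (list[T]): _description_
--
--     Returns:
--         set[T]: _description_
--     """
--
--     ngram_temp = []
--     for e in liste:
--         ngram_temp.append([e])
--         for e2 in ngram_temp[:-1]:
--             e2.append(e)
--
--     ngram_set = set()
--     for e in ngram_temp:
--         ngram_set.add(tuple(e))
--
--     return ngram_set
-- ===== SOURCE B (Python) =====
-- def liste_tout_ngram(liste):
--     return {tuple(liste[i:]) for i in range(len(liste))}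
-- ===== Notes on version B (the rewrite author's own statement) =====
-- stated objective: simpler
-- what changed: B builds each non-empty suffix independently as a slice liste[i:] in a one-line set comprehension, eliminating A's nested inner loop that incrementally extends shared mutable accumulator lists and A's second set-building pass.
import Mathlib
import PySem

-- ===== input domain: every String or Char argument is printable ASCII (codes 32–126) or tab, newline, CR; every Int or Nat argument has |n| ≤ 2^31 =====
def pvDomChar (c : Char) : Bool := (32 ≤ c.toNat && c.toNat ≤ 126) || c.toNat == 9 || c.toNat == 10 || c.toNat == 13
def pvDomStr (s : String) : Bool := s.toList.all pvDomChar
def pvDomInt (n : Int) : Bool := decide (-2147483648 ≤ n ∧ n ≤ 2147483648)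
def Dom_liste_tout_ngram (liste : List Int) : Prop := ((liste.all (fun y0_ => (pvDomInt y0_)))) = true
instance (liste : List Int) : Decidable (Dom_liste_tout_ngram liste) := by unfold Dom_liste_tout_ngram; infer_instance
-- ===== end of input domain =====

-- B replaces A's nested incremental build of shared suffix lists (plus a second
-- set-building pass) by one set comprehension over independent slices liste[i:]: simpler.


-- ===== PORT A =====
-- 'ngram_temp.append([e]); for e2 in ngram_temp[:-1]: e2.append(e)' mutates every
-- earlier list in place; functionally the new state is (each old list ++ [e]) ++ [[e]].
def liste_tout_ngram (liste : List Int) : List (List Int) :=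
  let ngram_temp := liste.foldl (fun acc e => acc.map (fun e2 => e2 ++ [e]) ++ [[e]]) []
  ngram_temp.foldl (fun s e => PySem.Set.add s e) PySem.Set.empty

-- ===== PORT B =====
def liste_tout_ngram_alt (liste : List Int) : List (List Int) :=
  (PySem.List.pyRange 0 (liste.length : Int) 1).foldl
    (fun s i => PySem.Set.add s (PySem.List.slice liste (some i) none)) PySem.Set.empty

-- ===== PRECONDITION & SPEC =====
def Spec_liste_tout_ngram (liste : List Int) (out : List (List Int)) : Prop := out = liste_tout_ngram_alt liste
instance (liste : List Int) (out : List (List Int)) : Decidable (Spec_liste_tout_ngram liste out) := by unfold Spec_liste_tout_ngram; infer_instance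

-- ===== CLAIM (what is proved, stated in full; the proofs are below) =====
def Claim_equal_liste_tout_ngram : Prop := ∀ (liste : List Int), Dom_liste_tout_ngram liste → Spec_liste_tout_ngram liste (liste_tout_ngram liste)

-- ===== LEMMAS AND PROOFS =====

-- A's accumulator after processing l is exactly the list of nonempty suffixes of l in order.
theorem ngram_temp_eq_suffixes (l : List Int) :
    l.foldl (fun acc e => acc.map (fun e2 => e2 ++ [e]) ++ [[e]]) [] =
      (List.range l.length).map (fun i => l.drop i) := by
  induction l using List.reverseRecOn with
  | nil => simp
  | append_singleton l x ih =>
    rw [List.foldl_append, ih]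
    simp only [List.foldl_cons, List.foldl_nil, List.length_append, List.length_singleton,
      List.range_succ, List.map_append, List.map_map]
    congr 1
    · apply List.map_congr_left
      intro i hi
      have : i ≤ l.length := Nat.le_of_lt (List.mem_range.mp hi)
      simp [List.drop_append_of_le_length this]
    · simp

theorem liste_tout_ngram_spec : Claim_equal_liste_tout_ngram := by
  intro liste _
  show liste_tout_ngram liste = liste_tout_ngram_alt liste
  unfold liste_tout_ngram liste_tout_ngram_alt
  rw [ngram_temp_eq_suffixes, PySem.List.pyRange_zero_nat, List.foldl_map, List.foldl_map]
  apply PySem.List.foldl_congr_mem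
  intro acc k hk
  rw [PySem.List.slice_some_none, PySem.List.clampIdx_natCast]
  rcases Nat.le_total k liste.length with h | h
  · rw [Nat.min_eq_left h]
  · rw [Nat.min_eq_right h, List.drop_of_length_le h, List.drop_of_length_le (le_refl _)]
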